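-- pv_equiv track=rewrite | github.com/MariaMsu/Info_Search | HW_5/HW_5_python2/model_language.py | create_pair_from_list
-- ===== SOURCE A (Python) =====
-- def create_pair_from_list(word_list):
--     if not word_list:
--         return []
--     pair_list = ["^" + word_list[0]]
--     for i in range(len(word_list) - 1):
--         pair_list += [word_list[i] + word_list[i + 1]]
--     pair_list += [word_list[-1] + "_"]
--     return pair_list
-- ===== SOURCE B (Python) =====
-- def create_pair_from_list(word_list):
--     if not word_list:
--         return []
--     out = []
--     nxt = "_"
--     for w in reversed(word_list):
--         out.append(w + nxt)
--         nxt = w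
--     out.append("^" + nxt)
--     out.reverse()
--     return out
-- ===== Notes on version B (the rewrite author's own statement) =====
-- stated objective: alternative
-- what changed: Builds the pair list back-to-front: one reverse traversal threading the following token through an accumulator (the '_' sentinel is the seed, the '^' pair is the final state), then a single reversal, instead of A's forward index loop with unrolled head and tail pairs.
import Mathlib
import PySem

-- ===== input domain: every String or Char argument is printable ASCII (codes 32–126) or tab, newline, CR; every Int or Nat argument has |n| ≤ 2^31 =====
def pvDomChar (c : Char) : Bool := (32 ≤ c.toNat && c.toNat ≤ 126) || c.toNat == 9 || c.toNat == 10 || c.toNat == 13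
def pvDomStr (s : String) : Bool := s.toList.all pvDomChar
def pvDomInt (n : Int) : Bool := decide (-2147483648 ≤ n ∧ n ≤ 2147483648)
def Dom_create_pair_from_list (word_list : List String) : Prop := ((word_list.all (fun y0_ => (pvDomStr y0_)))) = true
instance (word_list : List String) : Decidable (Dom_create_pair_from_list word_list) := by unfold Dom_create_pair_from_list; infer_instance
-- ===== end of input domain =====

-- B builds the pair list back-to-front over the reversed input, threading the following token, then reverses once (alternative decomposition; same cost).

-- ===== PORT A =====
def create_pair_from_list (word_list : List String) : List String :=
  if word_list.isEmpty then []
  else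
    let pair_list : List String := ["^" ++ PySem.List.pyGetD word_list 0 ""]
    let pair_list := (PySem.List.pyRange 0 ((word_list.length : Int) - 1) 1).foldl
      (fun acc i => acc ++ [PySem.List.pyGetD word_list i "" ++ PySem.List.pyGetD word_list (i + 1) ""]) pair_list
    pair_list ++ [PySem.List.pyGetD word_list (-1) "" ++ "_"]

-- ===== PORT B =====
def create_pair_from_list_alt (word_list : List String) : List String :=
  if word_list.isEmpty then []
  else
    let s := word_list.reverse.foldl
      (fun (p : List String × String) w => (p.1 ++ [w ++ p.2], w)) (([] : List String), "_")
    (s.1 ++ ["^" ++ s.2]).reverse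

-- ===== PRECONDITION & SPEC =====
def Spec_create_pair_from_list (word_list : List String) (out : List String) : Prop := out = create_pair_from_list_alt word_list
instance (word_list : List String) (out : List String) : Decidable (Spec_create_pair_from_list word_list out) := by unfold Spec_create_pair_from_list; infer_instance

-- ===== CLAIM (what is proved, stated in full; the proofs are below) =====
def Claim_equal_create_pair_from_list : Prop := ∀ (word_list : List String), Dom_create_pair_from_list word_list → Spec_create_pair_from_list word_list (create_pair_from_list word_list)

-- ===== LEMMAS AND PROOFS =====

-- A's middle loop, read off as adjacent pairs: zipWith over the list and its tail.
theorem pv_range_map_adj (h : String) (t : List String) :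
    (List.range t.length).map
      (fun (k : Nat) => PySem.List.pyGetD (h :: t) (k : Int) "" ++ PySem.List.pyGetD (h :: t) ((k : Int) + 1) "") =
    List.zipWith (fun a b => a ++ b) (h :: t) t := by
  apply List.ext_getElem
  · simp
  · intro k h1 h2
    have hk : k < t.length := by simpa using h1
    simp only [List.getElem_map, List.getElem_range, List.getElem_zipWith]
    rw [show ((k : Int) + 1) = (((k + 1 : Nat) : Int)) by push_cast; ring]
    rw [PySem.List.pyGetD_natCast, PySem.List.pyGetD_natCast]
    rw [List.getD_eq_getElem _ _ (by simpa using Nat.lt_succ_of_lt hk),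
        List.getD_eq_getElem _ _ (by simpa using Nat.succ_lt_succ hk)]
    simp

-- B's back-to-front fold, characterised: the accumulated (reversed) pairs and the leading word.
theorem pv_fold_eq (h : String) (t : List String) :
    (h :: t).foldr (fun w (p : List String × String) => (p.1 ++ [w ++ p.2], w)) (([] : List String), "_") =
    ((List.zipWith (fun a b => a ++ b) (h :: t) t ++ [(h :: t).getLast (by simp) ++ "_"]).reverse, h) := by
  induction t generalizing h with
  | nil => simp
  | cons h2 t2 ih => simp [ih h2]

theorem create_pair_from_list_eq (word_list : List String) :
    create_pair_from_list word_list = create_pair_from_list_alt word_list := by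
  cases word_list with
  | nil => rfl
  | cons h t =>
    unfold create_pair_from_list create_pair_from_list_alt
    simp only [List.isEmpty_cons, Bool.false_eq_true, if_false]
    rw [PySem.List.foldl_append_singleton_eq_map]
    have hr : PySem.List.pyRange 0 (((h :: t).length : Int) - 1) 1
        = (List.range t.length).map (fun (k : Nat) => (k : Int)) := by
      rw [show (((h :: t).length : Int) - 1) = (t.length : Int) by simp]
      exact PySem.List.pyRange_zero_nat t.length
    rw [hr, List.map_map]
    have hm := pv_range_map_adj h t
    simp only [Function.comp_def] at hm ⊢
    rw [hm, PySem.List.pyGetD_neg_one (h :: t) "" (by simp)]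
    rw [List.foldl_reverse, pv_fold_eq h t]
    simp [PySem.List.pyGetD_zero_cons]

-- ===== VERDICT (by name: the statement is the Claim_ definition above) =====
theorem create_pair_from_list_spec : Claim_equal_create_pair_from_list := by
  intro wl _
  exact create_pair_from_list_eq wl
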